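-- pv_equiv track=rewrite | github.com/davll/practical-algorithms | HackerRank/min_max_riddle.py | riddle_naive
-- ===== SOURCE A (Python) =====
-- def riddle_naive(n, arr):
--     result = []
--     for s in range(1,n+1):
--         val = 0
--         for i in range(n-s+1):
--             val = max(val, min(arr[i:i+s]))
--         result.append(val)
--     return result
-- ===== SOURCE B (Python) =====
-- def riddle_naive(n, arr):
--     # Transposed traversal: iterate over window starts, maintain a running
--     # minimum while extending the window, and keep per-size maxima in place.
--     result = [0] * n
--     for i in range(n):
--         m = arr[i]
--         for j in range(i, n):
--             m = min(m, arr[j])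
--             k = j - i
--             result[k] = max(result[k], m)
--     return result
-- ===== Notes on version B (the rewrite author's own statement) =====
-- stated objective: faster
-- what changed: Instead of recomputing min(arr[i:i+s]) from scratch for every size s and start i (three nested passes), B iterates over window starts once, extends each window while maintaining a running minimum, and accumulates the per-size maxima in a result array updated in place.
import Mathlib
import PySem

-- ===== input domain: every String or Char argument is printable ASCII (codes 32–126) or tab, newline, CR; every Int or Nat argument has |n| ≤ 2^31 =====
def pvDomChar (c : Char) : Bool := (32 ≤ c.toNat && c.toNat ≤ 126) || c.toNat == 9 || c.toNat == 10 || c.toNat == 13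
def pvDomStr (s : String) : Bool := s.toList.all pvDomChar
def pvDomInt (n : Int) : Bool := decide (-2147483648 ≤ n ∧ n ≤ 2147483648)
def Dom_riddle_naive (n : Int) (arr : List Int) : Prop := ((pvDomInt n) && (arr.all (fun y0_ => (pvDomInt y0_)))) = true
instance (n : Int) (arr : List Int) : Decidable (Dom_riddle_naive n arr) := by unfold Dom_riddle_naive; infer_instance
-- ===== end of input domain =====

-- B replaces A's triple-nested scan by one pass over window starts with a
-- running minimum, accumulating per-size maxima in place (objective: faster).

-- ===== PORT A =====
def riddle_naive (n : Int) (arr : List Int) : List Int :=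
  (PySem.List.pyRange 1 (n + 1) 1).foldl (fun result s =>
    let val :=
      (PySem.List.pyRange 0 (n - s + 1) 1).foldl (fun val i =>
        max val ((PySem.List.min? (PySem.List.slice arr (some i) (some (i + s))) (fun x => x)).getD 0)) 0
    result ++ [val]) []

-- ===== PORT B =====
def riddle_naive_alt (n : Int) (arr : List Int) : List Int :=
  let result : List Int := List.replicate n.toNat 0   -- [0] * n
  (PySem.List.pyRange 0 n 1).foldl (fun result i =>
    ((PySem.List.pyRange i n 1).foldl (fun (st : Int × List Int) j =>
        let m := min st.1 (PySem.List.pyGetD arr j 0)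
        let k := j - i
        (m, PySem.List.pySetD st.2 k (max (PySem.List.pyGetD st.2 k 0) m)))
      (PySem.List.pyGetD arr i 0, result)).2) result

-- ===== PRECONDITION & SPEC =====
-- A raises ValueError (min() of an empty slice) exactly when n > len(arr); those inputs are excluded.
def Pre_riddle_naive (n : Int) (arr : List Int) : Prop := n ≤ (arr.length : Int)
instance (n : Int) (arr : List Int) : Decidable (Pre_riddle_naive n arr) := by unfold Pre_riddle_naive; infer_instance
def pvWitness_riddle_naive : Int × List Int := (3, [2, -1, 4])

def Spec_riddle_naive (n : Int) (arr : List Int) (out : List Int) : Prop := out = riddle_naive_alt n arr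
instance (n : Int) (arr : List Int) (out : List Int) : Decidable (Spec_riddle_naive n arr out) := by unfold Spec_riddle_naive; infer_instance

-- ===== CLAIM (what is proved, stated in full; the proofs are below) =====
def Claim_equal_riddle_naive : Prop := ∀ (n : Int) (arr : List Int), Dom_riddle_naive n arr → Pre_riddle_naive n arr → Spec_riddle_naive n arr (riddle_naive n arr)

-- ===== LEMMAS AND PROOFS =====

-- running minimum of the window of length s starting at i (the common reference)
def rmin (arr : List Int) (i s : Nat) : Int :=
  ((arr.drop i).take s).foldl min (arr.getD i 0)

-- reference value of result entry k (window size k+1)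
def refval (arr : List Int) (N k : Nat) : Int :=
  (List.range (N - k)).foldl (fun v i => max v (rmin arr i (k + 1))) 0

theorem rmin_succ (arr : List Int) (i k : Nat) (h : i < arr.length) :
    rmin arr i (k + 1) = ((arr.drop (i + 1)).take k).foldl min arr[i] := by
  unfold rmin
  rw [List.drop_eq_getElem_cons h, List.take_succ_cons, List.getD_eq_getElem arr 0 h]
  simp [List.foldl_cons]

theorem riddle_naive_A_eq_ref (n : Int) (arr : List Int) (hn : 0 ≤ n)
    (hlen : n ≤ (arr.length : Int)) :
    riddle_naive n arr =
      (List.range n.toNat).map (fun k => refval arr n.toNat k) := by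
  obtain ⟨N, rfl⟩ : ∃ N : Nat, n = (N : Int) := ⟨n.toNat, (Int.toNat_of_nonneg hn).symm⟩
  have hN : N ≤ arr.length := by exact_mod_cast hlen
  unfold riddle_naive
  rw [PySem.List.pyRange_one]
  have h1 : ((N : Int) + 1 - 1).toNat = N := by omega
  rw [h1, List.foldl_map, PySem.List.foldl_append_singleton_eq_map, List.nil_append,
      Int.toNat_natCast]
  apply List.map_congr_left
  intro k hk
  rw [List.mem_range] at hk
  have h2 : (N : Int) - (1 + (k : Int)) + 1 = ((N - k : Nat) : Int) := by omega
  rw [h2, PySem.List.pyRange_one]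
  rw [Int.sub_zero, Int.toNat_natCast, List.foldl_map]
  unfold refval
  apply PySem.List.foldl_congr_mem
  intro v i hi
  rw [List.mem_range] at hi
  have hilt : i < arr.length := by omega
  have h3 : (0 : Int) + (i : Int) = ((i : Int)) := by ring
  have h4 : (i : Int) + (1 + (k : Int)) = ((i : Int)) + ((k + 1 : Nat) : Int) := by push_cast; ring
  rw [h3, h4, PySem.List.slice_natCast_add]
  rw [List.drop_eq_getElem_cons hilt, List.take_succ_cons,
      PySem.List.min?_id_cons]
  rw [Option.getD_some, rmin_succ arr i k hilt]

-- named forms of B's loops (definitionally the lambdas in the port)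
def stepB (arr : List Int) (i : Int) (st : Int × List Int) (j : Int) : Int × List Int :=
  let m := min st.1 (PySem.List.pyGetD arr j 0)
  let k := j - i
  (m, PySem.List.pySetD st.2 k (max (PySem.List.pyGetD st.2 k 0) m))

def innerF (arr : List Int) (n i j : Int) (m : Int) (res : List Int) : Int × List Int :=
  (PySem.List.pyRange j n 1).foldl (stepB arr i) (m, res)

def outerF (arr : List Int) (n t : Int) (res : List Int) : List Int :=
  (PySem.List.pyRange t n 1).foldl (fun result i =>
    (innerF arr n i i (PySem.List.pyGetD arr i 0) result).2) res

theorem alt_eq_outerF (n : Int) (arr : List Int) :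
    riddle_naive_alt n arr = outerF arr n 0 (List.replicate n.toNat 0) := rfl

-- running min of arr[j..e] folded onto m
def winmin (arr : List Int) (j e : Nat) (m : Int) : Int :=
  ((arr.drop j).take (e + 1 - j)).foldl min m

-- result entry k after the outer loop has processed starts 0..t-1
def acc (arr : List Int) (N t k : Nat) : Int :=
  (List.range (min t (N - k))).foldl (fun v i => max v (rmin arr i (k + 1))) 0

theorem getD_set_ne_int (l : List Int) (idx k : Nat) (v d : Int) (h : idx ≠ k) :
    (l.set idx v).getD k d = l.getD k d := by
  simp [List.getD_eq_getElem?_getD, List.getElem?_set_ne h]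

theorem innerB (arr : List Int) (N : Nat) (hN : N ≤ arr.length) (i : Nat) :
    ∀ (d j : Nat), j + d = N → i ≤ j → ∀ (m : Int) (res : List Int), res.length = N →
    (innerF arr N i j m res).2.length = N ∧
    ∀ k : Nat, k < N →
      (innerF arr N i j m res).2.getD k 0 =
        if j ≤ i + k ∧ i + k < N then max (res.getD k 0) (winmin arr j (i + k) m)
        else res.getD k 0 := by
  intro d
  induction d with
  | zero =>
    intro j hj hij m res hres
    have hjN : j = N := by omega
    rw [hjN]
    unfold innerF
    rw [PySem.List.pyRange_one_eq_nil (le_refl _)]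
    refine ⟨hres, ?_⟩
    intro k hk
    rw [if_neg (by omega)]
    rfl
  | succ d ih =>
    intro j hj hij m res hres
    have hjN : j < N := by omega
    have hjlen : j < arr.length := by omega
    unfold innerF
    rw [PySem.List.pyRange_one_cons (by exact_mod_cast hjN), List.foldl_cons]
    have hget : PySem.List.pyGetD arr (j : Int) 0 = arr[j] := by
      rw [PySem.List.pyGetD_natCast, List.getD_eq_getElem arr 0 hjlen]
    have hsub : (j : Int) - (i : Int) = ((j - i : Nat) : Int) := by omega
    have hki : j - i < N := by omega
    have hstep : stepB arr i (m, res) (j : Int) =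
        (min m arr[j], res.set (j - i) (max (res.getD (j - i) 0) (min m arr[j]))) := by
      unfold stepB
      simp only [hget, hsub, PySem.List.pySetD_natCast, PySem.List.pyGetD_natCast]
    rw [hstep]
    have hcast : (j : Int) + 1 = ((j + 1 : Nat) : Int) := by omega
    rw [hcast]
    have hres' : (res.set (j - i) (max (res.getD (j - i) 0) (min m arr[j]))).length = N := by
      rw [List.length_set]; exact hres
    obtain ⟨hL, hE⟩ := ih (j + 1) (by omega) (by omega) (min m arr[j]) _ hres'
    unfold innerF at hL hE
    refine ⟨hL, ?_⟩
    intro k hk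
    rw [hE k hk]
    have hdrop : arr.drop j = arr[j] :: arr.drop (j + 1) := List.drop_eq_getElem_cons hjlen
    by_cases h1 : i + k < N
    · by_cases h2 : j ≤ i + k
      · by_cases h3 : j = i + k
        · rw [if_neg (by omega), if_pos (by omega)]
          have hkeq : k = j - i := by omega
          subst hkeq
          rw [List.getD_eq_getElem _ 0 (by omega), List.getElem_set_self (by omega)]
          have hw : winmin arr j (i + (j - i)) m = min m arr[j] := by
            unfold winmin
            have h4 : i + (j - i) + 1 - j = 1 := by omega
            rw [h4, hdrop, List.take_succ_cons, List.take_zero, List.foldl_cons, List.foldl_nil]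
          rw [hw, List.getD_eq_getElem _ 0 (by omega)]
        · rw [if_pos (by omega), if_pos (by omega)]
          rw [getD_set_ne_int res (j - i) k _ 0 (by omega)]
          have hw : winmin arr (j + 1) (i + k) (min m arr[j]) = winmin arr j (i + k) m := by
            unfold winmin
            have h5 : i + k + 1 - j = (i + k + 1 - (j + 1)) + 1 := by omega
            rw [h5, hdrop, List.take_succ_cons, List.foldl_cons]
          rw [hw]
      · rw [if_neg (by omega), if_neg (by omega)]
        exact getD_set_ne_int res (j - i) k _ 0 (by omega)
    · rw [if_neg (by omega), if_neg (by omega)]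
      exact getD_set_ne_int res (j - i) k _ 0 (by omega)

theorem outerB (arr : List Int) (N : Nat) (hN : N ≤ arr.length) :
    ∀ (d t : Nat), t + d = N → ∀ (res : List Int), res.length = N →
    (∀ k : Nat, k < N → res.getD k 0 = acc arr N t k) →
    (outerF arr N t res).length = N ∧
    ∀ k : Nat, k < N → (outerF arr N t res).getD k 0 = acc arr N N k := by
  intro d
  induction d with
  | zero =>
    intro t ht res hres hinv
    have htN : t = N := by omega
    subst htN
    unfold outerF
    rw [PySem.List.pyRange_one_eq_nil (le_refl _)]
    exact ⟨hres, fun k hk => hinv k hk⟩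
  | succ d ih =>
    intro t ht res hres hinv
    have htN : t < N := by omega
    have htlen : t < arr.length := by omega
    unfold outerF
    rw [PySem.List.pyRange_one_cons (by exact_mod_cast htN), List.foldl_cons]
    have hget : PySem.List.pyGetD arr (t : Int) 0 = arr[t] := by
      rw [PySem.List.pyGetD_natCast, List.getD_eq_getElem arr 0 htlen]
    rw [hget]
    obtain ⟨hL, hE⟩ := innerB arr N hN t (N - t) t (by omega) (le_refl t) arr[t] res hres
    have hcast : (t : Int) + 1 = ((t + 1 : Nat) : Int) := by omega
    rw [hcast]
    have := ih (t + 1) (by omega) (innerF arr (N : Int) t t arr[t] res).2 hL (by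
      intro k hk
      rw [hE k hk]
      by_cases h1 : k < N - t
      · rw [if_pos (by omega), hinv k hk]
        have hwin : winmin arr t (t + k) arr[t] = rmin arr t (k + 1) := by
          unfold winmin rmin
          have h2 : t + k + 1 - t = k + 1 := by omega
          rw [h2, List.getD_eq_getElem arr 0 htlen]
        rw [hwin]
        unfold acc
        have h3 : min t (N - k) = t := by omega
        have h4 : min (t + 1) (N - k) = t + 1 := by omega
        rw [h3, h4, List.range_succ, List.foldl_append, List.foldl_cons, List.foldl_nil]
      · rw [if_neg (by omega), hinv k hk]
        unfold acc
        have h3 : min t (N - k) = min (t + 1) (N - k) := by omega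
        rw [h3])
    unfold outerF at this
    exact this

theorem riddle_naive_B_eq_ref (n : Int) (arr : List Int) (hn : 0 ≤ n)
    (hlen : n ≤ (arr.length : Int)) :
    riddle_naive_alt n arr =
      (List.range n.toNat).map (fun k => refval arr n.toNat k) := by
  obtain ⟨N, rfl⟩ : ∃ N : Nat, n = (N : Int) := ⟨n.toNat, (Int.toNat_of_nonneg hn).symm⟩
  have hN : N ≤ arr.length := by exact_mod_cast hlen
  rw [alt_eq_outerF, Int.toNat_natCast]
  obtain ⟨hL, hE⟩ := outerB arr N hN N 0 (by omega) (List.replicate N 0)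
    (List.length_replicate) (by
      intro k hk
      rw [List.getD_eq_getElem _ 0 (by simpa using hk), List.getElem_replicate]
      unfold acc
      simp)
  rw [Nat.cast_zero] at hL hE
  apply List.ext_getElem
  · rw [hL, List.length_map, List.length_range]
  · intro k h1 h2
    have hk : k < N := by
      rw [List.length_map, List.length_range] at h2; exact h2
    have hval := hE k hk
    rw [List.getD_eq_getElem _ 0 (by omega)] at hval
    rw [hval, List.getElem_map, List.getElem_range]
    unfold acc refval
    rw [min_eq_right (by omega)]

-- ===== VERDICT (by name: the statement is the Claim_ definition above) =====
theorem riddle_naive_spec : Claim_equal_riddle_naive := by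
  intro n arr _ hpre
  unfold Spec_riddle_naive
  by_cases hn : 0 ≤ n
  · rw [riddle_naive_A_eq_ref n arr hn hpre, riddle_naive_B_eq_ref n arr hn hpre]
  · have hneg : n < 0 := by omega
    have h1 : riddle_naive n arr = [] := by
      unfold riddle_naive
      rw [PySem.List.pyRange_one_eq_nil (by omega)]
      rfl
    have h2 : riddle_naive_alt n arr = [] := by
      unfold riddle_naive_alt
      rw [PySem.List.pyRange_one_eq_nil (by omega)]
      simp [Int.toNat_of_nonpos (le_of_lt hneg)]
    rw [h1, h2]
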